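-- pv_equiv track=rewrite | github.com/eduardgg/projects | games/sudoku_solver_v1.py | finished
-- ===== SOURCE A (Python) =====
-- def finished(sudoku):
--
--     for i in range(9):
--         for j in range(9):
--             if sudoku[i][j] == 0:
--                 return False
--
--     for i in range(9):
--         numeros = set()
--         for j in range(9):
--             if (sudoku[i][j] != 0):
--                 if (sudoku[i][j] in numeros):
--                     return False
--                 numeros.add(sudoku[i][j])
--
--     for j in range(9):
--         numeros = set()
--         for i in range(9):
--             if (sudoku[i][j] != 0):
--                 if (sudoku[i][j] in numeros):
--                     return False
--                 numeros.add(sudoku[i][j])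
--
--     for bx in range(3):
--         for by in range(3):
--             numeros = set()
--             for i in range(3):
--                 for j in range(3):
--                     if (sudoku[3*bx+i][3*by+j] != 0):
--                         if (sudoku[3*bx+i][3*by+j] in numeros):
--                             return False
--                         numeros.add(sudoku[3*bx+i][3*by+j])
--
--     return True
-- ===== SOURCE B (Python) =====
-- def finished(sudoku):
--     for i in range(9):
--         for j in range(9):
--             if sudoku[i][j] == 0:
--                 return False
--     units = []
--     for i in range(9):
--         units.append([sudoku[i][j] for j in range(9)])
--     for j in range(9):
--         units.append([sudoku[i][j] for i in range(9)])
--     for bx in range(3):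
--         for by in range(3):
--             units.append([sudoku[3 * bx + i][3 * by + j] for i in range(3) for j in range(3)])
--     return all(len(set(u)) == 9 for u in units)
-- ===== Notes on version B (the rewrite author's own statement) =====
-- stated objective: simpler
-- what changed: Keeps A's row-major zero scan, but replaces A's three separate early-return duplicate-detection loop nests (incremental membership sets per row, column and box) by building the 27 unit lists and uniformly checking each has 9 distinct values via len(set(u)) == 9.
import Mathlib
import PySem

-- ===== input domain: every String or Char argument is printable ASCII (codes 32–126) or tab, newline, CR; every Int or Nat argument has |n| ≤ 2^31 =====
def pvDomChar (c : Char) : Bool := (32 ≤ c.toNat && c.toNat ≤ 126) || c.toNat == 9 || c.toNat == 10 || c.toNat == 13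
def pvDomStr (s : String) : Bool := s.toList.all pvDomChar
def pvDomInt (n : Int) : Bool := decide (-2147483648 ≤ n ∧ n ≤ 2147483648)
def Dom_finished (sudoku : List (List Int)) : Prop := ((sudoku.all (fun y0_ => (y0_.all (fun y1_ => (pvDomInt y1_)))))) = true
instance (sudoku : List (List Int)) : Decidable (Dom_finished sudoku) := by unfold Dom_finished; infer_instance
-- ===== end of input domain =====

-- B replaces A's four early-return loop nests with a flat zero-membership test plus a uniform
-- "each of the 27 unit lists has 9 distinct values" check (no speed claim; return value only).

-- shared index/cell helpers (both Pythons read sudoku[i][j] over the same ranges)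
def pvR9 : List Int := PySem.List.pyRange 0 9 1
def pvR3 : List Int := PySem.List.pyRange 0 3 1
def pvCell (s : List (List Int)) (i j : Int) : Int :=
  PySem.List.pyGetD (PySem.List.pyGetD s i []) j 0   -- in range under Pre_finished
def pvRow (s : List (List Int)) (i : Int) : List Int := pvR9.map (fun j => pvCell s i j)
def pvCol (s : List (List Int)) (j : Int) : List Int := pvR9.map (fun i => pvCell s i j)
def pvBox (s : List (List Int)) (bx bY : Int) : List Int :=
  pvR3.flatMap (fun i => pvR3.map (fun j => pvCell s (3 * bx + i) (3 * bY + j)))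

-- ===== PORT A =====
-- A's per-unit loop: walk the values, skip zeros, return False on a value already in the set
def pvScanDup : List Int → PySem.Set Int → Bool
  | [], _ => true
  | v :: vs, seen =>
    if v ≠ 0 then
      if PySem.Set.contains seen v then false
      else pvScanDup vs (PySem.Set.add seen v)
    else pvScanDup vs seen

def finished (sudoku : List (List Int)) : Bool :=
  (pvR9.all fun i => pvR9.all fun j => !(pvCell sudoku i j == 0)) &&
  (pvR9.all fun i => pvScanDup (pvRow sudoku i) PySem.Set.empty) &&
  (pvR9.all fun j => pvScanDup (pvCol sudoku j) PySem.Set.empty) &&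
  (pvR3.all fun bx => pvR3.all fun bY => pvScanDup (pvBox sudoku bx bY) PySem.Set.empty)

-- ===== PORT B =====
def pvLenCheck (u : List Int) : Bool := (PySem.Set.ofList u).length == 9

def finished_alt (sudoku : List (List Int)) : Bool :=
  if pvR9.all fun i => pvR9.all fun j => !(pvCell sudoku i j == 0) then
    ((pvR9.map (fun i => pvRow sudoku i)) ++ (pvR9.map (fun j => pvCol sudoku j)) ++
      (pvR3.flatMap fun bx => pvR3.map fun bY => pvBox sudoku bx bY)).all pvLenCheck
  else false

-- ===== PRECONDITION & SPEC =====
-- Pre_ excludes exactly the boards on which the Python A raises IndexError: those missing a cell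
-- of the 9×9 grid that A's row-major zero scan reaches before finding a zero.
def Pre_finished (sudoku : List (List Int)) : Prop :=
  (9 ≤ sudoku.length ∧ ∀ row ∈ sudoku.take 9, 9 ≤ row.length) ∨
  (∃ i < 9, ∃ j < 9, i < sudoku.length ∧ (∀ k < i, 9 ≤ (sudoku.getD k []).length) ∧
    j < (sudoku.getD i []).length ∧ (sudoku.getD i []).getD j 1 = 0)
instance (sudoku : List (List Int)) : Decidable (Pre_finished sudoku) := by
  unfold Pre_finished; infer_instance
def pvWitness_finished : List (List Int) :=
  [[1,2,3,4,5,6,7,8,9],[4,5,6,7,8,9,1,2,3],[7,8,9,1,2,3,4,5,6],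
   [2,3,4,5,6,7,8,9,1],[5,6,7,8,9,1,2,3,4],[8,9,1,2,3,4,5,6,7],
   [3,4,5,6,7,8,9,1,2],[6,7,8,9,1,2,3,4,5],[9,1,2,3,4,5,6,7,8]]
def Spec_finished (sudoku : List (List Int)) (out : Bool) : Prop := out = finished_alt sudoku
instance (sudoku : List (List Int)) (out : Bool) : Decidable (Spec_finished sudoku out) := by unfold Spec_finished; infer_instance

-- ===== CLAIM (what is proved, stated in full; the proofs are below) =====
def Claim_equal_finished : Prop := ∀ (sudoku : List (List Int)), Dom_finished sudoku → Pre_finished sudoku → Spec_finished sudoku (finished sudoku)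

-- ===== LEMMAS AND PROOFS =====

theorem pvR9_eq : pvR9 = [0,1,2,3,4,5,6,7,8] := by decide
theorem pvR3_eq : pvR3 = [0,1,2] := by decide

theorem set_contains_true {s : PySem.Set Int} {v : Int} (h : v ∈ s) :
    PySem.Set.contains s v = true := by
  simp [PySem.Set.contains, h]

theorem set_contains_false {s : PySem.Set Int} {v : Int} (h : v ∉ s) :
    PySem.Set.contains s v = false := by
  simp [PySem.Set.contains, h]

theorem scanDup_iff (u : List Int) (hnz : ∀ v ∈ u, v ≠ 0) (seen : PySem.Set Int) :
    pvScanDup u seen = true ↔ u.Nodup ∧ ∀ v ∈ u, v ∉ seen := by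
  induction u generalizing seen with
  | nil => simp [pvScanDup]
  | cons v vs ih =>
    have hv : v ≠ 0 := hnz v (List.mem_cons_self ..)
    rw [show pvScanDup (v :: vs) seen =
        (if v ≠ 0 then (if PySem.Set.contains seen v then false
          else pvScanDup vs (PySem.Set.add seen v)) else pvScanDup vs seen) from rfl,
      if_pos hv]
    by_cases hm : v ∈ seen
    · rw [set_contains_true hm, if_pos rfl]
      constructor
      · intro h; exact absurd h (by simp)
      · rintro ⟨-, h⟩; exact absurd (h v (List.mem_cons_self ..)) (by simp [hm])
    · have hc := set_contains_false hm
      have hadd : PySem.Set.add seen v = seen ++ [v] := by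
        simp [PySem.Set.add, PySem.Set.contains, hm]
      rw [hc, if_neg (by simp), hadd,
        ih (fun w hw => hnz w (List.mem_cons_of_mem _ hw))]
      constructor
      · rintro ⟨hnd, hall⟩
        refine ⟨List.nodup_cons.mpr ⟨?_, hnd⟩, ?_⟩
        · intro hvvs
          exact (hall v hvvs) (List.mem_append_right _ (by simp))
        · intro w hw
          rcases List.mem_cons.mp hw with rfl | hw'
          · exact hm
          · exact fun hws => (hall w hw') (List.mem_append_left _ hws)
      · rintro ⟨hnd, hall⟩
        rcases List.nodup_cons.mp hnd with ⟨hvnot, hnd'⟩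
        refine ⟨hnd', fun w hw => ?_⟩
        simp only [List.mem_append, List.mem_singleton]
        rintro (hws | rfl)
        · exact (hall w (List.mem_cons_of_mem _ hw)) hws
        · exact hvnot hw

theorem ofList_length_eq (u : List Int) :
    (PySem.Set.ofList u).length = u.toFinset.card := by
  rw [← List.toFinset_card_of_nodup (PySem.Set.nodup_ofList u)]
  congr 1
  ext x
  simp [PySem.Set.mem_ofList]

theorem lenCheck_iff (u : List Int) (h9 : u.length = 9) :
    pvLenCheck u = true ↔ u.Nodup := by
  rw [pvLenCheck, beq_iff_eq, ofList_length_eq, List.card_toFinset]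
  constructor
  · intro h
    have hsub : u.dedup.Sublist u := List.dedup_sublist u
    have : u.dedup = u := hsub.eq_of_length (by omega)
    exact this ▸ List.nodup_dedup u
  · intro h
    rw [List.Nodup.dedup h, h9]

theorem unit_eq (u : List Int) (h9 : u.length = 9) (hnz : ∀ v ∈ u, v ≠ 0) :
    pvScanDup u PySem.Set.empty = pvLenCheck u := by
  have h1 : pvScanDup u PySem.Set.empty = true ↔ u.Nodup := by
    rw [scanDup_iff u hnz]
    exact ⟨fun h => h.1, fun h => ⟨h, fun v _ hv => nomatch hv⟩⟩
  have h2 := lenCheck_iff u h9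
  have e1 : pvScanDup u PySem.Set.empty = decide u.Nodup := by
    by_cases h : u.Nodup
    · rw [h1.mpr h]; simp [h]
    · have hne : pvScanDup u PySem.Set.empty ≠ true := fun hx => h (h1.mp hx)
      rw [Bool.eq_false_iff.mpr hne]; simp [h]
  have e2 : pvLenCheck u = decide u.Nodup := by
    by_cases h : u.Nodup
    · rw [h2.mpr h]; simp [h]
    · have hne : pvLenCheck u ≠ true := fun hx => h (h2.mp hx)
      rw [Bool.eq_false_iff.mpr hne]; simp [h]
  rw [e1, e2]

theorem length_pvRow (s : List (List Int)) (i : Int) : (pvRow s i).length = 9 := by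
  simp [pvRow, pvR9_eq]
theorem length_pvCol (s : List (List Int)) (j : Int) : (pvCol s j).length = 9 := by
  simp [pvCol, pvR9_eq]
theorem length_pvBox (s : List (List Int)) (bx bY : Int) : (pvBox s bx bY).length = 9 := by
  simp [pvBox, pvR3_eq]

theorem main_eq (s : List (List Int)) : finished s = finished_alt s := by
  rw [finished, finished_alt]
  cases h1 : (pvR9.all fun i => pvR9.all fun j => !(pvCell s i j == 0)) with
  | false => simp
  | true =>
    have hnz : ∀ i ∈ pvR9, ∀ j ∈ pvR9, pvCell s i j ≠ 0 := by
      intro i hi j hj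
      have h2 := (List.all_eq_true.mp ((List.all_eq_true.mp h1) i hi)) j hj
      simpa using h2
    have hrange9 : ∀ x : Int, x ∈ pvR9 ↔ 0 ≤ x ∧ x < 9 := by
      intro x; rw [pvR9]; exact PySem.List.mem_pyRange_one
    have hrange3 : ∀ x : Int, x ∈ pvR3 ↔ 0 ≤ x ∧ x < 3 := by
      intro x; rw [pvR3]; exact PySem.List.mem_pyRange_one
    have hrow : ∀ i ∈ pvR9, pvScanDup (pvRow s i) PySem.Set.empty = pvLenCheck (pvRow s i) := by
      intro i hi
      refine unit_eq _ (length_pvRow s i) ?_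
      intro v hv
      rw [pvRow] at hv
      rcases List.mem_map.mp hv with ⟨j, hj, rfl⟩
      exact hnz i hi j hj
    have hcol : ∀ j ∈ pvR9, pvScanDup (pvCol s j) PySem.Set.empty = pvLenCheck (pvCol s j) := by
      intro j hj
      refine unit_eq _ (length_pvCol s j) ?_
      intro v hv
      rw [pvCol] at hv
      rcases List.mem_map.mp hv with ⟨i, hi, rfl⟩
      exact hnz i hi j hj
    have hbox : ∀ bx ∈ pvR3, ∀ bY ∈ pvR3,
        pvScanDup (pvBox s bx bY) PySem.Set.empty = pvLenCheck (pvBox s bx bY) := by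
      intro bx hbx bY hbY
      refine unit_eq _ (length_pvBox s bx bY) ?_
      intro v hv
      rw [pvBox] at hv
      rcases List.mem_flatMap.mp hv with ⟨i, hi, hv'⟩
      rcases List.mem_map.mp hv' with ⟨j, hj, rfl⟩
      rcases (hrange3 bx).mp hbx with ⟨h1, h2⟩
      rcases (hrange3 bY).mp hbY with ⟨h3, h4⟩
      rcases (hrange3 i).mp hi with ⟨h5, h6⟩
      rcases (hrange3 j).mp hj with ⟨h7, h8⟩
      exact hnz _ ((hrange9 _).mpr (by omega)) _ ((hrange9 _).mpr (by omega))
    rw [if_pos rfl, Bool.true_and, Bool.eq_iff_iff]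
    simp only [Bool.and_eq_true, List.all_eq_true, List.all_append,
      List.mem_map, List.mem_flatMap]
    constructor
    · rintro ⟨⟨hr, hc⟩, hb⟩
      refine ⟨⟨?_, ?_⟩, ?_⟩
      · rintro u ⟨i, hi, rfl⟩
        rw [← hrow i hi]; exact hr i hi
      · rintro u ⟨j, hj, rfl⟩
        rw [← hcol j hj]; exact hc j hj
      · rintro u ⟨bx, hbx, bY, hbY, rfl⟩
        rw [← hbox bx hbx bY hbY]; exact hb bx hbx bY hbY
    · rintro ⟨⟨hrr, hcc⟩, hbb⟩
      refine ⟨⟨fun i hi => ?_, fun j hj => ?_⟩, fun bx hbx bY hbY => ?_⟩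
      · rw [hrow i hi]; exact hrr _ ⟨i, hi, rfl⟩
      · rw [hcol j hj]; exact hcc _ ⟨j, hj, rfl⟩
      · rw [hbox bx hbx bY hbY]; exact hbb _ ⟨bx, hbx, bY, hbY, rfl⟩

-- ===== VERDICT (by name: the statement is the Claim_ definition above) =====
theorem finished_spec : Claim_equal_finished := by
  intro s _ _
  unfold Spec_finished
  exact main_eq s
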